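-- pv_equiv track=rewrite | github.com/JanSoLul/programmer | new_id.py | solution
-- ===== SOURCE A (Python) =====
-- def solution(new_id):
-- 	new_id = new_id.lower()
-- 	save_id = ''
-- 	for i in new_id:
-- 		if i.isalnum() or i=='-' or i=='_' or i=='.':
-- 			save_id += i
-- 	answer = ''
-- 	save_len = len(save_id)
-- 	for i in range(save_len):
-- 		if save_id[i] == '.':
-- 			if i==0 or i==save_len-1 or save_id[i-1]=='.':
-- 				continue
-- 		answer += save_id[i]
-- 	if answer == '':
-- 		answer += 'aaa'
-- 	elif len(answer) > 15:
-- 		answer = answer[:15]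
-- 	if answer[-1] == '.':
-- 		answer = answer[:-1]
-- 	if len(answer) < 3:
-- 		for _ in range(3-len(answer)):
-- 			answer += answer[-1]
--
-- 	return answer
-- ===== SOURCE B (Python) =====
-- def solution(new_id):
--     filtered = ''.join(c for c in new_id.lower() if c.isalnum() or c in '-_.')
--     answer = '.'.join(p for p in filtered.split('.') if p)
--     if answer == '':
--         answer = 'aaa'
--     elif len(answer) > 15:
--         answer = answer[:15]
--         if answer[-1] == '.':
--             answer = answer[:-1]
--     if len(answer) < 3:
--         answer += answer[-1] * (3 - len(answer))
--     return answer
-- ===== Notes on version B (the rewrite author's own statement) =====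
-- stated objective: simpler
-- what changed: The index-scanning loop that collapses dot runs and strips edge dots (with a lookback at the previous index and boundary index tests) is replaced by token processing: split the filtered string on the dot separator, drop empty tokens, rejoin with single dots; the post-truncation trailing-dot strip and the length-3 padding are kept, the padding done by string repetition instead of a character-append loop.
import Mathlib
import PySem

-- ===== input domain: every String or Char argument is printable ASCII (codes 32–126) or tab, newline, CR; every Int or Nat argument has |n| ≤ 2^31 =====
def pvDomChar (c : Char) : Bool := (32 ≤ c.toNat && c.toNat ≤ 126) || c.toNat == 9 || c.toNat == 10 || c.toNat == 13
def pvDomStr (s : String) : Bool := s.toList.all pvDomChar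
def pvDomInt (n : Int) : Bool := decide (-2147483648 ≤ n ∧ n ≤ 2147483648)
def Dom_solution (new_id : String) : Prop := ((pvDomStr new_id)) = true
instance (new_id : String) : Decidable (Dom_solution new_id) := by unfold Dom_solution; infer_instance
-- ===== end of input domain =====

-- B replaces A's index-scanning dot-collapse loop by split('.')/drop-empty-tokens/join token processing; objective: simpler.

-- ===== PORT A =====
def solution (new_id : String) : String :=
  let nid := (PySem.Str.lower new_id).toList
  let save_id : List Char := nid.foldl (fun acc i =>
    if PySem.Chars.isalnum i || i == '-' || i == '_' || i == '.' then acc ++ [i] else acc) []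
  let save_len := save_id.length
  let answer : List Char := (PySem.List.pyRange 0 (save_len : Int) 1).foldl (fun acc i =>
      if PySem.List.pyGetD save_id i ' ' == '.' then
        if i == 0 || i == (save_len : Int) - 1 || PySem.List.pyGetD save_id (i - 1) ' ' == '.' then acc
        else acc ++ [PySem.List.pyGetD save_id i ' ']
      else acc ++ [PySem.List.pyGetD save_id i ' ']) []
  let answer := if answer = [] then answer ++ ['a', 'a', 'a']
    else if answer.length > 15 then PySem.List.slice answer none (some 15)
    else answer
  let answer := if PySem.List.pyGetD answer (-1) ' ' == '.' then PySem.List.slice answer none (some (-1)) else answer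
  let answer := if answer.length < 3 then
      (List.range (3 - answer.length)).foldl (fun a _ => a ++ [PySem.List.pyGetD a (-1) ' ']) answer
    else answer
  String.ofList answer

-- ===== PORT B =====
def solution_alt (new_id : String) : String :=
  let filtered : List Char := (PySem.Str.lower new_id).toList.filter
    (fun c => PySem.Chars.isalnum c || ['-', '_', '.'].contains c)
  let answer : List Char := PySem.Chars.join ['.'] ((PySem.Chars.splitOn filtered ['.']).filter (fun p => p ≠ []))
  let answer := if answer = [] then ['a', 'a', 'a']
    else if answer.length > 15 then
      let a := PySem.List.slice answer none (some 15)
      if PySem.List.pyGetD a (-1) ' ' == '.' then PySem.List.slice a none (some (-1)) else a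
    else answer
  let answer := if answer.length < 3 then
      answer ++ List.replicate (3 - answer.length) (PySem.List.pyGetD answer (-1) ' ')
    else answer
  String.ofList answer

-- ===== PRECONDITION & SPEC =====
def Spec_solution (new_id : String) (out : String) : Prop := out = solution_alt new_id
instance (new_id : String) (out : String) : Decidable (Spec_solution new_id out) := by unfold Spec_solution; infer_instance

-- ===== CLAIM (what is proved, stated in full; the proofs are below) =====
def Claim_equal_solution : Prop := ∀ (new_id : String), Dom_solution new_id → Spec_solution new_id (solution new_id)

-- ===== LEMMAS AND PROOFS =====

def pvSplit : List Char → List Char × List (List Char)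
  | [] => ([], [])
  | c :: r =>
    if c = '.' then ([], (pvSplit r).1 :: (pvSplit r).2)
    else (c :: (pvSplit r).1, (pvSplit r).2)
theorem pvSplitOn_go_eq (fuel : Nat) (l cur : List Char) (acc : List (List Char)) (h : l.length < fuel) :
    PySem.Chars.splitOn.go ['.'] fuel l cur acc =
      acc.reverse ++ (cur.reverse ++ (pvSplit l).1) :: (pvSplit l).2 := by
  induction fuel generalizing l cur acc with
  | zero => omega
  | succ f ih =>
    cases l with
    | nil => simp [PySem.Chars.splitOn.go, pvSplit]
    | cons c rest =>
      by_cases hc : c = '.'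
      · subst hc
        rw [PySem.Chars.splitOn.go]
        simp only [List.isPrefixOf, BEq.rfl, Bool.true_and, List.isPrefixOf_nil_left, if_true]
        rw [ih _ _ _ (by simpa using Nat.lt_of_succ_lt_succ h)]
        simp [pvSplit]
      · rw [PySem.Chars.splitOn.go]
        simp only [List.isPrefixOf]
        rw [if_neg (by simp; exact fun h => absurd h.symm hc)]
        rw [ih _ _ _ (by simpa using Nat.lt_of_succ_lt_succ h)]
        simp [pvSplit, hc]

theorem pvSplitOn_eq (s : List Char) :
    PySem.Chars.splitOn s ['.'] = (pvSplit s).1 :: (pvSplit s).2 := by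
  rw [PySem.Chars.splitOn, pvSplitOn_go_eq _ _ _ _ (by omega)]
  simp

def pvCollapse (b : Bool) : List Char → List Char
  | [] => []
  | c :: r =>
    if c = '.' then
      if b || r.isEmpty then pvCollapse true r else c :: pvCollapse true r
    else c :: pvCollapse false r
def pvTU (b : Bool) : List Char → List Char
  | [] => []
  | c :: r =>
    if c = '.' then
      if b then pvTU true r else (if pvTU true r = [] then [] else '.' :: pvTU true r)
    else c :: pvTU false r
def pvE (b : Bool) : List Char → Bool
  | [] => false
  | c :: r =>
    if c = '.' then
      if b then pvE true r
      else if r = [] then false else (if r.all (· = '.') then true else pvE true r)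
    else pvE false r
def pvD (ts : List (List Char)) : List Char :=
  if ts.filter (fun p => p ≠ []) = [] then [] else '.' :: PySem.Chars.join ['.'] (ts.filter (fun p => p ≠ []))


theorem pvGetLast?_cons_ne_nil (a : Char) (l : List Char) (h : l ≠ []) : (a :: l).getLast? = l.getLast? := by
  cases l with
  | nil => exact absurd rfl h
  | cons b t => simp [List.getLast?_cons_cons]

theorem pvJoin_ne_nil (ts : List (List Char)) (h : ∀ t ∈ ts, t ≠ []) (h2 : ts ≠ []) :
    PySem.Chars.join ['.'] ts ≠ [] := by
  cases ts with
  | nil => exact absurd rfl h2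
  | cons t rest =>
    cases rest with
    | nil => simpa [PySem.Chars.join_singleton] using h t (by simp)
    | cons q r =>
      rw [PySem.Chars.join_cons_cons]
      have := h t (by simp)
      cases t <;> simp_all

theorem pvJoin_TU (s : List Char) :
    PySem.Chars.join ['.'] (((pvSplit s).1 :: (pvSplit s).2).filter (fun p => p ≠ [])) = pvTU true s ∧
    (pvSplit s).1 ++ pvD (pvSplit s).2 = pvTU false s := by
  induction s with
  | nil => simp [pvSplit, pvTU, pvD, PySem.Chars.join_nil]
  | cons c r ih =>
    by_cases hc : c = '.'
    · subst hc
      simp only [pvSplit, pvTU, reduceIte]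
      constructor
      · simpa using ih.1
      · simp only [List.nil_append, pvD]
        by_cases hz : ((pvSplit r).1 :: (pvSplit r).2).filter (fun p => p ≠ []) = []
        · rw [if_pos hz]
          rw [hz, PySem.Chars.join_nil] at ih
          simp [← ih.1]
        · have hne : pvTU true r ≠ [] := by
            rw [← ih.1]
            exact pvJoin_ne_nil _ (fun t ht => by simpa using (List.mem_filter.mp ht).2) hz
          rw [if_neg hz, ih.1, if_neg hne]
          simp
    · simp only [pvSplit, if_neg hc, pvTU]
      have key : PySem.Chars.join ['.'] (((c :: (pvSplit r).1) :: (pvSplit r).2).filter (fun p => p ≠ [])) =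
          (c :: (pvSplit r).1) ++ pvD (pvSplit r).2 := by
        rw [List.filter_cons_of_pos (by simp)]
        rcases hz : ((pvSplit r).2).filter (fun p => p ≠ []) with _ | ⟨q, rest⟩
        · simp only [PySem.Chars.join_singleton, pvD, hz, reduceIte]
          simp
        · rw [PySem.Chars.join_cons_cons, pvD, hz, if_neg (by simp)]
          simp
      constructor
      · rw [key]; simp [ih.2, hc]
      · simp [← ih.2, hc]

theorem pvTU_true_nil_iff (s : List Char) : pvTU true s = [] ↔ s.all (· = '.') := by
  induction s with
  | nil => simp [pvTU]
  | cons c r ih =>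
    by_cases hc : c = '.' <;> simp [pvTU, hc, ih]

theorem pvE_of_allDots (s : List Char) (h : s.all (· = '.')) : pvE true s = false := by
  induction s with
  | nil => simp [pvE]
  | cons c r ih =>
    simp only [List.all_cons, Bool.and_eq_true, decide_eq_true_eq] at h
    simp [pvE, h.1, ih h.2]

theorem pvCollapse_eq_TU (s : List Char) (b : Bool) :
    pvCollapse b s = pvTU b s ++ (if pvE b s then ['.'] else []) := by
  induction s generalizing b with
  | nil => simp [pvCollapse, pvTU, pvE]
  | cons c r ih =>
    by_cases hc : c = '.'
    · subst hc
      cases b with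
      | true => simp only [pvCollapse, pvTU, pvE, reduceIte, Bool.true_or]; exact ih true
      | false =>
        simp only [pvCollapse, pvTU, pvE, reduceIte, Bool.false_or]
        cases r with
        | nil => simp [pvTU, pvE, pvCollapse]
        | cons d q =>
          simp only [List.isEmpty_cons, reduceIte]
          by_cases hz : pvTU true (d :: q) = []
          · rw [if_pos hz]
            have hall := (pvTU_true_nil_iff (d :: q)).mp hz
            rw [if_pos hall, ih true, hz, pvE_of_allDots _ hall]
            simp
          · have hall : ¬ ((d :: q).all (· = '.') = true) :=
              fun hall => hz ((pvTU_true_nil_iff _).mpr hall)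
            rw [if_neg hz, ih true]
            simp only [pvE, reduceIte]
            have h2 : ¬ (d = '.' ∧ ∀ x ∈ q, x = '.') := by simpa using hall
            simp [h2]
    · cases b <;> simp [pvCollapse, pvTU, pvE, hc, ih false]

theorem pvTU_ne_nil_of_E (s : List Char) (h : pvE true s = true) : pvTU true s ≠ [] := by
  induction s with
  | nil => simp [pvE] at h
  | cons c r ih =>
    by_cases hc : c = '.'
    · subst hc
      simp only [pvE, reduceIte] at h
      simpa [pvTU] using ih h
    · simp [pvTU, hc]

theorem pvTU_last_ne_dot (s : List Char) (b : Bool) : (pvTU b s).getLast? ≠ some '.' := by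
  induction s generalizing b with
  | nil => simp [pvTU]
  | cons c r ih =>
    by_cases hc : c = '.'
    · subst hc
      cases b with
      | true => simpa [pvTU] using ih true
      | false =>
        by_cases hz : pvTU true r = []
        · simp [pvTU, hz]
        · simp only [pvTU, Bool.false_eq_true, if_false, if_true, reduceIte, if_neg hz]
          rw [pvGetLast?_cons_ne_nil _ _ hz]
          exact ih true
    · by_cases hz : pvTU false r = []
      · simp [pvTU, hz, hc]
      · simp only [pvTU, if_neg hc]
        rw [pvGetLast?_cons_ne_nil _ _ hz]
        exact ih false

theorem pvPyGetD_neg_one (xs : List Char) (h : xs ≠ []) :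
    PySem.List.pyGetD xs (-1) ' ' = xs.getLast?.getD ' ' := by
  have hl : 1 ≤ xs.length := by
    cases xs
    · exact absurd rfl h
    · simp
  simp only [PySem.List.pyGetD, PySem.List.pyGet?, PySem.List.pyIdx?]
  norm_num [hl]
  rw [List.getLast?_eq_getElem?]

theorem pvPad_eq (n : Nat) (xs : List Char) (h : xs ≠ []) :
    (List.range n).foldl (fun a _ => a ++ [PySem.List.pyGetD a (-1) ' ']) xs =
      xs ++ List.replicate n (PySem.List.pyGetD xs (-1) ' ') := by
  induction n with
  | zero => simp
  | succ m ih =>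
    rw [List.range_succ, List.foldl_append, ih]
    simp only [List.foldl_cons, List.foldl_nil]
    rw [List.replicate_succ', ← List.append_assoc]
    congr 1
    cases m with
    | zero => simp
    | succ k =>
      rw [pvPyGetD_neg_one _ (by simp [h]), List.replicate_succ', ← List.append_assoc,
        List.getLast?_concat]
      rfl

def pvStep (s : List Char) (acc : List Char) (i : Int) : List Char :=
  if PySem.List.pyGetD s i ' ' == '.' then
    if i == 0 || i == (s.length : Int) - 1 || PySem.List.pyGetD s (i - 1) ' ' == '.' then acc
    else acc ++ [PySem.List.pyGetD s i ' ']
  else acc ++ [PySem.List.pyGetD s i ' ']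

theorem pvGetD_append_len (u v : List Char) (c : Char) :
    PySem.List.pyGetD (u ++ c :: v) (u.length : Int) ' ' = c := by
  rw [PySem.List.pyGetD_natCast]
  simp [List.getD, List.getElem?_append_right (Nat.le_refl u.length)]

theorem pvGetD_append_pred (u v : List Char) (h : u ≠ []) :
    PySem.List.pyGetD (u ++ v) ((u.length : Int) - 1) ' ' = u.getLast?.getD ' ' := by
  have hl : 1 ≤ u.length := by
    cases u with
    | nil => exact absurd rfl h
    | cons a t => simp
  have : (u.length : Int) - 1 = ((u.length - 1 : Nat) : Int) := by omega
  rw [this, PySem.List.pyGetD_natCast]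
  rw [List.getD, List.getElem?_append, if_pos (by omega), List.getLast?_eq_getElem?]

theorem pvLoopA_aux (v : List Char) : ∀ (u acc : List Char),
    (List.range' u.length v.length).foldl (fun acc (k : Nat) => pvStep (u ++ v) acc (k : Int)) acc
      = acc ++ pvCollapse (u.isEmpty || (u.getLast? == some '.')) v := by
  induction v with
  | nil => intro u acc; simp [pvCollapse]
  | cons c r ih =>
    intro u acc
    rw [List.length_cons, List.range'_succ, List.foldl_cons]
    have hsplit : u ++ c :: r = (u ++ [c]) ++ r := by simp
    have hlen : (u ++ [c]).length = u.length + 1 := by simp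
    have estep : pvStep (u ++ c :: r) acc (u.length : Int) =
        if c = '.' then
          (if u = [] ∨ r = [] ∨ u.getLast? = some '.' then acc else acc ++ [c])
        else acc ++ [c] := by
      rw [pvStep, pvGetD_append_len]
      by_cases hc : c = '.'
      · rw [if_pos (by simp [hc]), if_pos hc]
        by_cases hcond : u = [] ∨ r = [] ∨ u.getLast? = some '.'
        · rw [if_pos hcond, if_pos ?_]
          rcases hcond with hu | hr | hlast
          · subst hu; simp
          · subst hr
            simp only [Bool.or_eq_true, beq_iff_eq]
            left; right
            simp only [List.length_append, List.length_cons, List.length_nil]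
            omega
          · have hu : u ≠ [] := by
              intro h; subst h; simp at hlast
            simp only [Bool.or_eq_true, beq_iff_eq]
            right
            rw [pvGetD_append_pred _ _ hu, hlast]
            rfl
        · push_neg at hcond
          obtain ⟨hu, hr, hlast⟩ := hcond
          have hbool : ¬ (((u.length : Int) == (0:Int) || (u.length : Int) == ((u ++ c :: r).length : Int) - 1 ||
              PySem.List.pyGetD (u ++ c :: r) ((u.length : Int) - 1) ' ' == '.') = true) := by
            simp only [Bool.or_eq_true, beq_iff_eq]
            push_neg
            refine ⟨⟨by simpa using hu, ?_⟩, ?_⟩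
            · have h1 : 1 ≤ u.length := by
                cases u with
                | nil => exact absurd rfl hu
                | cons a t => simp
              have h2 : r.length ≠ 0 := by simpa using hr
              simp only [List.length_append, List.length_cons]
              omega
            · rw [pvGetD_append_pred _ _ hu]
              intro hcon
              apply hlast
              cases hgl : u.getLast? with
              | none =>
                rw [List.getLast?_eq_none_iff] at hgl
                exact absurd hgl hu
              | some x =>
                rw [hgl] at hcon
                simp at hcon
                rw [hcon]
          rw [if_neg hbool, if_neg (by push_neg; exact ⟨hu, hr, hlast⟩), hc]
      · rw [if_neg (by simp [hc]), if_neg hc]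
    rw [estep]
    by_cases hc : c = '.'
    · subst hc
      rw [if_pos rfl]
      by_cases hcond : u = [] ∨ r = [] ∨ u.getLast? = some '.'
      · rw [if_pos hcond]
        have hcoll : pvCollapse (u.isEmpty || (u.getLast? == some '.')) ('.' :: r) = pvCollapse true r := by
          rw [pvCollapse, if_pos rfl, if_pos (by
            rcases hcond with h | h | h
            · simp [h]
            · simp [h]
            · simp [h])]
        rw [hcoll, hsplit, ← hlen, ih (u ++ ['.']) acc]
        simp
      · push_neg at hcond
        rw [if_neg (by push_neg; exact hcond)]
        have hcoll : pvCollapse (u.isEmpty || (u.getLast? == some '.')) ('.' :: r) = '.' :: pvCollapse true r := by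
          rw [pvCollapse, if_pos rfl, if_neg (by
            simp [List.isEmpty_iff, hcond.1, hcond.2.1, hcond.2.2])]
        rw [hcoll, hsplit, ← hlen, ih (u ++ ['.']) (acc ++ ['.'])]
        simp
    · rw [if_neg hc]
      have hcoll : pvCollapse (u.isEmpty || (u.getLast? == some '.')) (c :: r) = c :: pvCollapse false r := by
        rw [pvCollapse, if_neg hc]
      rw [hcoll, hsplit, ← hlen, ih (u ++ [c]) (acc ++ [c])]
      have hb : ((u ++ [c]).isEmpty || ((u ++ [c]).getLast? == some '.')) = false := by
        simp [List.getLast?_concat, hc]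
      rw [hb]
      simp

theorem pvLoopA_eq_collapse (s : List Char) :
    (PySem.List.pyRange 0 (s.length : Int) 1).foldl (fun acc i =>
      if PySem.List.pyGetD s i ' ' == '.' then
        if i == 0 || i == (s.length : Int) - 1 || PySem.List.pyGetD s (i - 1) ' ' == '.' then acc
        else acc ++ [PySem.List.pyGetD s i ' ']
      else acc ++ [PySem.List.pyGetD s i ' ']) [] = pvCollapse true s := by
  have h1 : PySem.List.pyRange 0 (s.length : Int) 1 = (List.range s.length).map (fun k : Nat => (k : Int)) :=
    PySem.List.pyRange_zero_natCast s.length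
  rw [h1, List.foldl_map, List.range_eq_range']
  have := pvLoopA_aux s [] []
  simpa [pvStep] using this

theorem pvSlice_neg_one (xs : List Char) : PySem.List.slice xs none (some (-1)) = xs.dropLast := by
  simp [PySem.List.slice, List.dropLast_eq_take]

theorem pvSlice_15 (xs : List Char) : PySem.List.slice xs none (some 15) = xs.take 15 := by
  rw [PySem.List.slice_to xs (by norm_num)]
  rfl
theorem pvPyGetD_neg_one' (xs : List Char) : PySem.List.pyGetD xs (-1) ' ' = xs.getLast?.getD ' ' := by
  cases hx : xs with
  | nil => simp [PySem.List.pyGetD, PySem.List.pyGet?, PySem.List.pyIdx?]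
  | cons a t => exact pvPyGetD_neg_one _ (by simp)

def pvTailA (c : List Char) : List Char :=
  let a1 := if c = [] then c ++ ['a', 'a', 'a']
    else if c.length > 15 then PySem.List.slice c none (some 15) else c
  let a2 := if PySem.List.pyGetD a1 (-1) ' ' == '.' then PySem.List.slice a1 none (some (-1)) else a1
  if a2.length < 3 then (List.range (3 - a2.length)).foldl (fun a _ => a ++ [PySem.List.pyGetD a (-1) ' ']) a2
  else a2

def pvTailB (t : List Char) : List Char :=
  let b1 := if t = [] then ['a', 'a', 'a']
    else if t.length > 15 then
      let a := PySem.List.slice t none (some 15)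
      if PySem.List.pyGetD a (-1) ' ' == '.' then PySem.List.slice a none (some (-1)) else a
    else t
  if b1.length < 3 then b1 ++ List.replicate (3 - b1.length) (PySem.List.pyGetD b1 (-1) ' ') else b1

theorem pvPad_eq' (n : Nat) (xs : List Char) (h : xs ≠ []) :
    (List.range n).foldl (fun a _ => a ++ [a.getLast?.getD ' ']) xs =
      xs ++ List.replicate n (xs.getLast?.getD ' ') := by
  have := pvPad_eq n xs h
  simpa [pvPyGetD_neg_one'] using this

theorem pvLastD_ne_dot (t : List Char) (hlast : t.getLast? ≠ some '.') :
    ¬ (t.getLast?.getD ' ' = '.') := by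
  cases hgl : t.getLast? with
  | none => simp
  | some x =>
    have : x ≠ '.' := fun h => hlast (by rw [hgl, h])
    simpa using this

theorem pvTail_case_same (t : List Char) (hlast : t.getLast? ≠ some '.') : pvTailA t = pvTailB t := by
  unfold pvTailA pvTailB
  simp only [pvSlice_15, pvSlice_neg_one, pvPyGetD_neg_one', beq_iff_eq]
  by_cases ht : t = []
  · subst ht; simp
  · by_cases h15 : t.length > 15
    · simp only [if_neg ht, if_pos h15]
      set u := if (t.take 15).getLast?.getD ' ' = '.' then (t.take 15).dropLast else t.take 15 with hu
      have hul : 3 ≤ u.length := by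
        rw [hu]
        split_ifs <;> simp <;> omega
      rw [if_neg (show ¬ u.length < 3 by omega), if_neg (show ¬ u.length < 3 by omega)]
    · simp only [if_neg ht, if_neg h15]
      rw [if_neg (pvLastD_ne_dot t hlast)]
      by_cases h3 : t.length < 3
      · rw [if_pos h3, if_pos h3, pvPad_eq' _ _ ht]
      · rw [if_neg h3, if_neg h3]

theorem pvTail_case_extra (t : List Char) (ht : t ≠ []) (hlast : t.getLast? ≠ some '.') :
    pvTailA (t ++ ['.']) = pvTailB t := by
  unfold pvTailA pvTailB
  simp only [pvSlice_15, pvSlice_neg_one, pvPyGetD_neg_one', beq_iff_eq]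
  rw [if_neg (show ¬ t ++ ['.'] = [] by simp), if_neg ht]
  by_cases h16 : t.length > 15
  · -- A truncates inside t, so both sides run the same take-15 pipeline
    rw [if_pos (show (t ++ ['.']).length > 15 by simp; omega), if_pos h16,
      List.take_append_of_le_length (show 15 ≤ t.length by omega)]
    set u := if (t.take 15).getLast?.getD ' ' = '.' then (t.take 15).dropLast else t.take 15 with hu
    have hul : 3 ≤ u.length := by
      rw [hu]
      split_ifs <;> simp <;> omega
    rw [if_neg (show ¬ u.length < 3 by omega), if_neg (show ¬ u.length < 3 by omega)]
  · by_cases h15 : t.length = 15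
    · -- A's [:15] cuts exactly the extra dot off
      rw [if_pos (show (t ++ ['.']).length > 15 by simp; omega),
        if_neg (show ¬ t.length > 15 by omega),
        List.take_append_of_le_length (show 15 ≤ t.length by omega),
        List.take_of_length_le (show t.length ≤ 15 by omega)]
      rw [if_neg (pvLastD_ne_dot t hlast),
        if_neg (show ¬ t.length < 3 by omega), if_neg (show ¬ t.length < 3 by omega)]
    · -- short: A keeps the extra dot and then strips it as the trailing dot
      rw [if_neg (show ¬ (t ++ ['.']).length > 15 by simp; omega),
        if_neg (show ¬ t.length > 15 by omega)]
      rw [if_pos (show (t ++ ['.']).getLast?.getD ' ' = '.' by rw [List.getLast?_concat]; rfl),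
        List.dropLast_concat]
      by_cases h3 : t.length < 3
      · rw [if_pos h3, if_pos h3, pvPad_eq' _ _ ht]
      · rw [if_neg h3, if_neg h3]
theorem pvTail_eq (s : List Char) : pvTailA (pvCollapse true s) = pvTailB (pvTU true s) := by
  have hlast := pvTU_last_ne_dot s true
  rw [pvCollapse_eq_TU]
  by_cases he : pvE true s = true
  · have ht := pvTU_ne_nil_of_E s he
    rw [if_pos he]
    exact pvTail_case_extra _ ht hlast
  · rw [if_neg he, List.append_nil]
    exact pvTail_case_same _ hlast

theorem pvPred_eq :
    (fun c => PySem.Chars.isalnum c || ['-', '_', '.'].contains c) =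
    (fun i => PySem.Chars.isalnum i || i == '-' || i == '_' || i == '.') := by
  funext c
  cases PySem.Chars.isalnum c <;> simp [Bool.or_assoc, Bool.beq_eq_decide_eq]

theorem pvA_eq (nid : String) :
    solution nid = String.ofList (pvTailA (pvCollapse true
      (((PySem.Str.lower nid).toList).filter
        (fun i => PySem.Chars.isalnum i || i == '-' || i == '_' || i == '.')))) := by
  unfold solution pvTailA
  simp only [PySem.List.foldl_append_if, List.nil_append, List.map_id_fun', id]
  rw [pvLoopA_eq_collapse]

theorem pvB_eq (nid : String) :
    solution_alt nid = String.ofList (pvTailB (pvTU true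
      (((PySem.Str.lower nid).toList).filter
        (fun i => PySem.Chars.isalnum i || i == '-' || i == '_' || i == '.')))) := by
  unfold solution_alt pvTailB
  simp only [pvPred_eq, pvSplitOn_eq, pvJoin_TU]

-- ===== VERDICT (by name: the statement is the Claim_ definition above) =====
theorem solution_spec : Claim_equal_solution := by
  intro new_id _
  unfold Spec_solution
  rw [pvA_eq, pvB_eq, pvTail_eq]
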